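-- pv_equiv track=rewrite | github.com/HijackedSlang/OperadoresGeneticosHorariosTesis | Operadores genéticos_Theta.py | cumple_restricciones_indices
-- ===== SOURCE A (Python) =====
-- def cumple_restricciones_indices(vector):
--     #Diccionario para guardar la cantidad de apariciones de parejas no nulas en cada índice relativo
--     apariciones_indice = {}
--     for i in range(len(vector)):
--         for j in range(len(vector[i])):
--             if vector[i][j][1] != 0:
--                 #Actualizando contador de apariciones en índice relativo
--                 if j in apariciones_indice:
--                     apariciones_indice[j] += 1
--                 else:
--                     apariciones_indice[j] = 1
--                 #checando cantidad de apariciones en índice relativo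
--                 if apariciones_indice[j] > 18:
--                     return False
--     return True
-- ===== SOURCE B (Python) =====
-- def cumple_restricciones_indices(vector):
--     width = max((len(row) for row in vector), default=0)
--     return all(
--         sum(1 for row in vector if j < len(row) and row[j][1] != 0) <= 18
--         for j in range(width)
--     )
-- ===== Notes on version B (the rewrite author's own statement) =====
-- stated objective: simpler
-- what changed: Replaces the dict-of-running-counters with early exit by a column-major scan: compute the max row width, then for each column index count its non-null entries directly and check all counts are <= 18.
import Mathlib
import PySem

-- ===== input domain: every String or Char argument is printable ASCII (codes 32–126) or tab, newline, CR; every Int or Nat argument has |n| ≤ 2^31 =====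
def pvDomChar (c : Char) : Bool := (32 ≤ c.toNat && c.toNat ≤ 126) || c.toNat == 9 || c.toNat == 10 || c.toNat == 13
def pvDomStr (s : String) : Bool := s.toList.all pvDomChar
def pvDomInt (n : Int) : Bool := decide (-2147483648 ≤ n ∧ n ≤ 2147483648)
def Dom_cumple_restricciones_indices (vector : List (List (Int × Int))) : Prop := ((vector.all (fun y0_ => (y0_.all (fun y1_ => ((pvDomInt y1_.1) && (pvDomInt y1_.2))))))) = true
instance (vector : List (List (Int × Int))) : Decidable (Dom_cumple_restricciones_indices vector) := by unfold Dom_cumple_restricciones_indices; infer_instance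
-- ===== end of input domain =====

-- B replaces A's running dict of per-column counters (with early exit) by a column-major
-- scan: max row width, then each column's non-null count checked against 18 (simpler).

-- ===== PORT A =====
-- inner `if j in dict: dict[j]+=1 else: dict[j]=1` then `if dict[j] > 18: return False`
def pvAincr (d : PySem.Dict Int Int) (j : Int) : PySem.Dict Int Int :=
  if (d.get? j).isSome then d.insert j (d.getD j 0 + 1) else d.insert j 1

-- inner loop `for j in range(len(vector[i]))`; `none` models `return False`
def pvArow (d : PySem.Dict Int Int) (j : Int) : List (Int × Int) → Option (PySem.Dict Int Int)
  | [] => some d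
  | p :: rest =>
    if p.2 ≠ 0 then
      let d' := pvAincr d j
      if d'.getD j 0 > 18 then none else pvArow d' (j + 1) rest
    else pvArow d (j + 1) rest

-- outer loop `for i in range(len(vector))`
def pvArows (d : PySem.Dict Int Int) : List (List (Int × Int)) → Bool
  | [] => true
  | r :: rs =>
    match pvArow d 0 r with
    | none => false
    | some d' => pvArows d' rs

def cumple_restricciones_indices (vector : List (List (Int × Int))) : Bool :=
  pvArows PySem.Dict.empty vector

-- ===== PORT B =====
def cumple_restricciones_indices_alt (vector : List (List (Int × Int))) : Bool :=
  let width := (vector.map List.length).foldl max 0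
  (List.range width).all (fun j =>
    decide (vector.countP (fun row => decide (j < row.length) && ((row.getD j (0, 0)).2 != 0)) ≤ 18))

-- ===== PRECONDITION & SPEC =====
def Spec_cumple_restricciones_indices (vector : List (List (Int × Int))) (out : Bool) : Prop := out = cumple_restricciones_indices_alt vector
instance (vector : List (List (Int × Int))) (out : Bool) : Decidable (Spec_cumple_restricciones_indices vector out) := by unfold Spec_cumple_restricciones_indices; infer_instance

-- ===== CLAIM (what is proved, stated in full; the proofs are below) =====
def Claim_equal_cumple_restricciones_indices : Prop := ∀ (vector : List (List (Int × Int))), Dom_cumple_restricciones_indices vector → Spec_cumple_restricciones_indices vector (cumple_restricciones_indices vector)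

-- ===== LEMMAS AND PROOFS =====

-- the sequence of column indices of non-null entries of a row, starting at k
def pvIdxs (k : Int) : List (Int × Int) → List Int
  | [] => []
  | p :: rest => if p.2 ≠ 0 then k :: pvIdxs (k + 1) rest else pvIdxs (k + 1) rest

-- A's counting loop abstracted to the flat index sequence
def pvStep (d : PySem.Dict Int Int) : List Int → Option (PySem.Dict Int Int)
  | [] => some d
  | j :: js =>
    let d' := d.insert j (d.getD j 0 + 1)
    if d'.getD j 0 > 18 then none else pvStep d' js

lemma pvAincr_eq (d : PySem.Dict Int Int) (j : Int) :
    pvAincr d j = d.insert j (d.getD j 0 + 1) := by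
  unfold pvAincr
  cases h : d.get? j with
  | none =>
      simp [PySem.Dict.getD_eq_get?_getD, h]
  | some v => simp

lemma pvArow_eq_step (row : List (Int × Int)) :
    ∀ (d : PySem.Dict Int Int) (j : Int), pvArow d j row = pvStep d (pvIdxs j row) := by
  induction row with
  | nil => intro d j; simp [pvArow, pvIdxs, pvStep]
  | cons p rest ih =>
      intro d j
      by_cases hp : p.2 ≠ 0
      · simp [pvArow, pvIdxs, hp, pvAincr_eq, pvStep, ih]
      · simp [pvArow, pvIdxs, hp, ih]

lemma pvStep_append (xs ys : List Int) :
    ∀ d, pvStep d (xs ++ ys) = (pvStep d xs).bind (fun d' => pvStep d' ys) := by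
  induction xs with
  | nil => intro d; simp [pvStep]
  | cons j js ih =>
      intro d
      simp only [List.cons_append, pvStep]
      split
      · rfl
      · exact ih _

lemma pvArows_eq_step (vec : List (List (Int × Int))) :
    ∀ d, pvArows d vec = (pvStep d (vec.flatMap (pvIdxs 0))).isSome := by
  induction vec with
  | nil => intro d; simp [pvArows, pvStep]
  | cons r rs ih =>
      intro d
      simp only [pvArows, List.flatMap_cons, pvStep_append, pvArow_eq_step]
      cases h : pvStep d (pvIdxs 0 r) with
      | none => simp
      | some d' => simp [ih]

lemma pvStep_isSome (js : List Int) :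
    ∀ d : PySem.Dict Int Int,
      (pvStep d js).isSome = decide (∀ j ∈ js, d.getD j 0 + (js.count j : Int) ≤ 18) := by
  induction js with
  | nil => intro d; simp [pvStep]
  | cons j js ih =>
      intro d
      simp only [pvStep, PySem.Dict.getD_insert_self]
      split
      · rename_i hgt
        simp only [Option.isSome_none]
        rw [eq_comm, decide_eq_false_iff_not]
        intro hall
        have h1 := hall j (List.mem_cons_self)
        rw [List.count_cons_self] at h1
        have hc : (0 : Int) ≤ (js.count j : Int) := Int.natCast_nonneg _
        push_cast at h1
        omega
      · rename_i hle
        rw [ih, decide_eq_decide]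
        constructor
        · intro hall k hk
          rcases List.mem_cons.mp hk with hkj | hkm
          · subst hkj
            by_cases hm : k ∈ js
            · have h1 := hall k hm
              rw [PySem.Dict.getD_insert_self] at h1
              rw [List.count_cons_self]
              push_cast at h1 ⊢
              omega
            · rw [List.count_cons_self, List.count_eq_zero_of_not_mem hm]
              push_cast
              omega
          · by_cases hkj : k = j
            · subst hkj
              have h1 := hall k hkm
              rw [PySem.Dict.getD_insert_self] at h1
              rw [List.count_cons_self]
              push_cast at h1 ⊢
              omega
            · have h1 := hall k hkm
              rw [PySem.Dict.getD_insert, if_neg hkj] at h1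
              rw [List.count_cons_of_ne (Ne.symm hkj)]
              exact h1
        · intro hall k hk
          by_cases hkj : k = j
          · subst hkj
            have h1 := hall k (List.mem_cons_self)
            rw [List.count_cons_self] at h1
            rw [PySem.Dict.getD_insert_self]
            push_cast at h1 ⊢
            omega
          · have h1 := hall k (List.mem_cons_of_mem _ hk)
            rw [List.count_cons_of_ne (Ne.symm hkj)] at h1
            rw [PySem.Dict.getD_insert, if_neg hkj]
            exact h1

lemma mem_pvIdxs_ge (row : List (Int × Int)) :
    ∀ (k j : Int), j ∈ pvIdxs k row → k ≤ j := by
  induction row with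
  | nil => intro k j h; simp [pvIdxs] at h
  | cons p rest ih =>
      intro k j h
      simp only [pvIdxs] at h
      by_cases hp : p.2 ≠ 0
      · rw [if_pos hp] at h
        rcases List.mem_cons.mp h with rfl | h
        · omega
        · have := ih (k + 1) j h; omega
      · rw [if_neg hp] at h
        have := ih (k + 1) j h; omega

lemma count_pvIdxs (row : List (Int × Int)) :
    ∀ (k : Int) (m : Nat),
      (pvIdxs k row).count (k + (m : Int)) =
        if m < row.length ∧ (row.getD m (0, 0)).2 ≠ 0 then 1 else 0 := by
  induction row with
  | nil => intro k m; simp [pvIdxs]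
  | cons p rest ih =>
      intro k m
      cases m with
      | zero =>
          have hz : (pvIdxs (k + 1) rest).count (k + ((0 : Nat) : Int)) = 0 := by
            apply List.count_eq_zero_of_not_mem
            intro hmem
            have := mem_pvIdxs_ge rest (k + 1) _ hmem
            omega
          simp only [pvIdxs]
          by_cases hp : p.2 ≠ 0
          · rw [if_pos hp, List.count_cons, hz]
            simp [hp]
          · rw [if_neg hp, hz]
            simp [hp]
      | succ m' =>
          have hk : k + ((m' + 1 : Nat) : Int) = (k + 1) + (m' : Int) := by push_cast; ring
          have hrec := ih (k + 1) m'
          simp only [pvIdxs]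
          by_cases hp : p.2 ≠ 0
          · rw [if_pos hp, List.count_cons, hk, hrec]
            have hne : ¬((k + 1) + (m' : Int) = k) := by omega
            simp only [List.length_cons, List.getD_cons_succ, Nat.add_lt_add_iff_right]
            simp
            omega
          · rw [if_neg hp, hk, hrec]
            simp only [List.length_cons, List.getD_cons_succ, Nat.add_lt_add_iff_right]

lemma mem_pvIdxs (row : List (Int × Int)) :
    ∀ (k j : Int), j ∈ pvIdxs k row → ∃ m : Nat, j = k + (m : Int) ∧ m < row.length := by
  induction row with
  | nil => intro k j h; simp [pvIdxs] at h
  | cons p rest ih =>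
      intro k j h
      simp only [pvIdxs] at h
      by_cases hp : p.2 ≠ 0
      · rw [if_pos hp] at h
        rcases List.mem_cons.mp h with rfl | h
        · exact ⟨0, by simp, by simp⟩
        · rcases ih (k + 1) j h with ⟨m, hm, hlt⟩
          exact ⟨m + 1, by push_cast; omega, by simpa using Nat.succ_lt_succ hlt⟩
      · rw [if_neg hp] at h
        rcases ih (k + 1) j h with ⟨m, hm, hlt⟩
        exact ⟨m + 1, by push_cast; omega, by simpa using Nat.succ_lt_succ hlt⟩

lemma flat_count (vector : List (List (Int × Int))) (m : Nat) :
    (vector.flatMap (pvIdxs 0)).count ((m : Nat) : Int) =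
      vector.countP (fun row => decide (m < row.length) && ((row.getD m (0, 0)).2 != 0)) := by
  induction vector with
  | nil => simp
  | cons r rs ih =>
      have hr : (pvIdxs 0 r).count ((m : Nat) : Int) =
          if m < r.length ∧ (r.getD m (0, 0)).2 ≠ 0 then 1 else 0 := by
        have := count_pvIdxs r 0 m
        simpa using this
      simp only [List.flatMap_cons, List.count_append, List.countP_cons, ih, hr]
      by_cases h1 : m < r.length <;> by_cases h2 : (r.getD m (0, 0)).2 ≠ 0 <;>
        simp [h1] <;> omega

lemma self_le_foldl_max : ∀ (l : List Nat) (c : Nat), c ≤ l.foldl max c := by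
  intro l
  induction l with
  | nil => intro c; simp
  | cons y ys ihy =>
      intro c
      simp only [List.foldl_cons]
      exact le_trans (le_max_left _ _) (ihy _)

lemma le_foldl_max (l : List Nat) : ∀ (b a : Nat), a ∈ l → a ≤ l.foldl max b := by
  induction l with
  | nil => intro b a h; cases h
  | cons x xs ih =>
      intro b a h
      rcases List.mem_cons.mp h with rfl | h
      · simp only [List.foldl_cons]
        exact le_trans (le_max_right b a) (self_le_foldl_max xs _)
      · simp only [List.foldl_cons]
        exact ih _ _ h

theorem pvMainEq (vector : List (List (Int × Int))) :
    cumple_restricciones_indices vector = cumple_restricciones_indices_alt vector := by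
  unfold cumple_restricciones_indices cumple_restricciones_indices_alt
  rw [pvArows_eq_step, pvStep_isSome]
  rw [Bool.eq_iff_iff]
  simp only [decide_eq_true_eq, List.all_eq_true, List.mem_range]
  constructor
  · intro hall m hm
    rw [← flat_count]
    by_cases hmem : ((m : Nat) : Int) ∈ vector.flatMap (pvIdxs 0)
    · have h1 := hall _ hmem
      rw [PySem.Dict.getD_empty] at h1
      omega
    · rw [List.count_eq_zero_of_not_mem hmem]
      omega
  · intro hall j hj
    rcases List.mem_flatMap.mp hj with ⟨row, hrow, hjr⟩
    rcases mem_pvIdxs row 0 j hjr with ⟨m, hjm, hlt⟩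
    have hw : m < (vector.map List.length).foldl max 0 := by
      have : row.length ≤ (vector.map List.length).foldl max 0 :=
        le_foldl_max _ _ _ (List.mem_map.mpr ⟨row, hrow, rfl⟩)
      omega
    have h1 := hall m hw
    rw [← flat_count] at h1
    rw [PySem.Dict.getD_empty]
    have hje : j = ((m : Nat) : Int) := by omega
    rw [hje]
    omega

-- ===== VERDICT (by name: the statement is the Claim_ definition above) =====
theorem cumple_restricciones_indices_spec : Claim_equal_cumple_restricciones_indices := by
  intro vector _
  unfold Spec_cumple_restricciones_indices
  exact pvMainEq vector
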